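-- pv_equiv track=rewrite | github.com/gwimbly03/8005 | project/source/node.py | idx_to_guess
-- ===== SOURCE A (Python) =====
-- CHARS = "abcdefghijklmnopqrstuvwxyzABCDEFGHIJKLMNOPQRSTUVWXYZ0123456789@#%^&*()_+-=.,:;?"
--
-- BASE = len(CHARS)
--
-- def idx_to_guess(idx: int) -> str:
--     """Convert integer index -> password string (variable length)."""
--     if idx == 0:
--         return CHARS[0]
--     out = []
--     while idx > 0:
--         out.append(CHARS[idx % BASE])
--         idx //= BASE
--     return "".join(reversed(out))
-- ===== SOURCE B (Python) =====
-- CHARS = "abcdefghijklmnopqrstuvwxyzABCDEFGHIJKLMNOPQRSTUVWXYZ0123456789@#%^&*()_+-=.,:;?"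
-- BASE = len(CHARS)
--
-- def idx_to_guess(idx: int) -> str:
--     """Convert integer index -> password string (variable length)."""
--     if idx <= 0:
--         return CHARS[0] if idx == 0 else ""
--     # first pass: count the digits (smallest length with idx < BASE**length)
--     length = 1
--     p = BASE
--     while p <= idx:
--         length += 1
--         p *= BASE
--     # second pass: read the digits most-significant first by place value
--     return "".join(CHARS[(idx // BASE ** (length - 1 - i)) % BASE] for i in range(length))
-- ===== Notes on version B (the rewrite author's own statement) =====
-- stated objective: alternative
-- what changed: Replaces A's single low-to-high digit loop plus reversed()/join with a two-pass scheme: one loop counts the digits, then each digit is read most-significant-first directly by place value ((idx // BASE**k) % BASE), so no digit list is built and nothing is reversed.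
import Mathlib
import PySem

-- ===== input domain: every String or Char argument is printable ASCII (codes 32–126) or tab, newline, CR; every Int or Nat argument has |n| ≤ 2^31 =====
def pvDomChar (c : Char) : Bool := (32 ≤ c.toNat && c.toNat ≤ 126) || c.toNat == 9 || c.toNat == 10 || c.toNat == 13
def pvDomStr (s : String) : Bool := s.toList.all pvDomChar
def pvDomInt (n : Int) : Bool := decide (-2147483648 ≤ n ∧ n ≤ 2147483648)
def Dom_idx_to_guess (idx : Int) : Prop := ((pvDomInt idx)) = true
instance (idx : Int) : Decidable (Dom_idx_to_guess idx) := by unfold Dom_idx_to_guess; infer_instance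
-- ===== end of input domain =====

-- B replaces A's single low-to-high digit loop + reversed()/join with two passes:
-- first count the digits, then read them most-significant first by place value
-- (objective: alternative algorithm, no list reversal).

def pvCHARS : List Char :=
  "abcdefghijklmnopqrstuvwxyzABCDEFGHIJKLMNOPQRSTUVWXYZ0123456789@#%^&*()_+-=.,:;?".toList

-- BASE = len(CHARS) = 79

-- ===== PORT A =====
-- the 'while idx > 0' loop of A, accumulating the appended characters in 'out'
def pvALoop (idx : Int) (out : List Char) : List Char :=
  if 0 < idx then
    pvALoop (PySem.Int.floordiv idx 79)
      (out ++ [PySem.List.pyGetD pvCHARS (PySem.Int.mod idx 79) ' '])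
  else out
termination_by idx.toNat
decreasing_by
  rw [PySem.Int.floordiv_eq_ediv_of_pos (by omega)]
  omega

def idx_to_guess (idx : Int) : String :=
  if idx = 0 then String.ofList [PySem.List.pyGetD pvCHARS 0 ' ']
  else String.ofList (pvALoop idx []).reverse

-- ===== PORT B =====
-- the 'while p <= idx: length += 1; p *= BASE' counting loop of B;
-- the '0 < p' conjunct is a totality guard only: it holds on every reachable state
def pvLenLoop (idx len p : Int) : Int :=
  if 0 < p ∧ p ≤ idx then pvLenLoop idx (len + 1) (p * 79) else len
termination_by (idx + 1 - p).toNat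
decreasing_by omega

-- exponent (length - 1 - i) is ≥ 0 wherever Source B evaluates it; .toNat is exact there
def idx_to_guess_alt (idx : Int) : String :=
  if idx ≤ 0 then (if idx = 0 then String.ofList [PySem.List.pyGetD pvCHARS 0 ' '] else "")
  else
    let length := pvLenLoop idx 1 79
    String.ofList ((PySem.List.pyRange 0 length 1).map (fun i =>
      PySem.List.pyGetD pvCHARS
        (PySem.Int.mod (PySem.Int.floordiv idx ((79 : Int) ^ (length - 1 - i).toNat)) 79) ' '))

-- ===== PRECONDITION & SPEC =====
def Spec_idx_to_guess (idx : Int) (out : String) : Prop := out = idx_to_guess_alt idx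
instance (idx : Int) (out : String) : Decidable (Spec_idx_to_guess idx out) := by unfold Spec_idx_to_guess; infer_instance

-- ===== CLAIM (what is proved, stated in full; the proofs are below) =====
def Claim_equal_idx_to_guess : Prop := ∀ (idx : Int), Dom_idx_to_guess idx → Spec_idx_to_guess idx (idx_to_guess idx)

-- ===== LEMMAS AND PROOFS =====

-- A's loop only appends: running it from 'out' prefixes 'out' to the run from [].
theorem pvALoop_out (n : Nat) : ∀ idx : Int, idx.toNat = n → ∀ out : List Char,
    pvALoop idx out = out ++ pvALoop idx [] := by
  induction n using Nat.strong_induction_on with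
  | _ n ih =>
    intro idx hn out
    by_cases h : 0 < idx
    · have e1 : ∀ o : List Char, pvALoop idx o =
          pvALoop (PySem.Int.floordiv idx 79)
            (o ++ [PySem.List.pyGetD pvCHARS (PySem.Int.mod idx 79) ' ']) := by
        intro o; rw [pvALoop]; simp [h]
      have hlt : (PySem.Int.floordiv idx 79).toNat < n := by
        rw [PySem.Int.floordiv_eq_ediv_of_pos (show (0:Int) < 79 by omega)]; omega
      rw [e1 out, e1 [], ih _ hlt _ rfl, ih _ hlt _ rfl (out := [] ++ _)]
      simp
    · rw [pvALoop]
      conv_rhs => rw [pvALoop]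
      simp [h]

-- the counting loop's result shifts with its accumulator
theorem pvLenLoop_shift (m : Nat) : ∀ (idx p : Int), (idx + 1 - p).toNat = m →
    ∀ (len : Int), pvLenLoop idx (len + 1) p = pvLenLoop idx len p + 1 := by
  induction m using Nat.strong_induction_on with
  | _ m ih =>
    intro idx p hm len
    conv_lhs => rw [pvLenLoop]
    conv_rhs => rw [pvLenLoop]
    by_cases h : 0 < p ∧ p ≤ idx
    · simp only [if_pos h]
      exact ih ((idx + 1 - p * 79).toNat) (by omega) idx (p * 79) rfl (len + 1)
    · simp [h]

-- accumulator lower bound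
theorem pvLenLoop_ge (m : Nat) : ∀ (idx p : Int), (idx + 1 - p).toNat = m →
    ∀ (len : Int), len ≤ pvLenLoop idx len p := by
  induction m using Nat.strong_induction_on with
  | _ m ih =>
    intro idx p hm len
    rw [pvLenLoop]
    by_cases h : 0 < p ∧ p ≤ idx
    · simp only [if_pos h]
      have := ih ((idx + 1 - p * 79).toNat) (by omega) idx (p * 79) rfl (len + 1)
      omega
    · simp [h]

-- dividing idx by the base removes one loop iteration
theorem pvLenLoop_div (m : Nat) : ∀ (idx p : Int), (idx + 1 - p).toNat = m → 0 < p →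
    ∀ (len : Int),
    pvLenLoop idx len (p * 79) = pvLenLoop (PySem.Int.floordiv idx 79) len p := by
  induction m using Nat.strong_induction_on with
  | _ m ih =>
    intro idx p hm hp len
    conv_lhs => rw [pvLenLoop]
    conv_rhs => rw [pvLenLoop]
    have hiff : p * 79 ≤ idx ↔ p ≤ PySem.Int.floordiv idx 79 :=
      (PySem.Int.le_floordiv_iff_mul_le (by omega)).symm
    by_cases h : p * 79 ≤ idx
    · rw [if_pos ⟨by omega, h⟩, if_pos ⟨hp, hiff.mp h⟩]
      exact ih ((idx + 1 - p * 79).toNat) (by omega) idx (p * 79) rfl (by omega) (len + 1)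
    · rw [if_neg (by omega), if_neg (fun hc => h (hiff.mpr hc.2))]

-- the digit count of idx // 79 is one less (for idx ≥ 79)
theorem pvLen_rec (idx : Int) (h : 79 ≤ idx) :
    pvLenLoop idx 1 79 = pvLenLoop (PySem.Int.floordiv idx 79) 1 79 + 1 := by
  conv_lhs => rw [pvLenLoop]
  rw [if_pos ⟨by omega, h⟩, show (1:Int) + 1 = 2 from rfl]
  rw [pvLenLoop_div ((idx + 1 - 79).toNat) idx 79 rfl (by omega) 2]
  rw [show (2 : Int) = 1 + 1 from rfl]
  exact pvLenLoop_shift ((PySem.Int.floordiv idx 79 + 1 - 79).toNat) _ 79 rfl 1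

-- main lemma: A's reversed digit list is B's place-value map
theorem pvMain (n : Nat) : ∀ idx : Int, idx.toNat = n → 1 ≤ idx →
    (pvALoop idx []).reverse =
      (PySem.List.pyRange 0 (pvLenLoop idx 1 79) 1).map (fun i =>
        PySem.List.pyGetD pvCHARS
          (PySem.Int.mod (PySem.Int.floordiv idx
            ((79 : Int) ^ (pvLenLoop idx 1 79 - 1 - i).toNat)) 79) ' ') := by
  induction n using Nat.strong_induction_on with
  | _ n ih =>
    intro idx hn h1
    have hA : pvALoop idx [] =
        [PySem.List.pyGetD pvCHARS (PySem.Int.mod idx 79) ' '] ++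
          pvALoop (PySem.Int.floordiv idx 79) [] := by
      rw [pvALoop, if_pos (by omega)]
      exact pvALoop_out _ _ rfl _
    by_cases hbig : 79 ≤ idx
    · -- recursive case
      have hq1 : 1 ≤ PySem.Int.floordiv idx 79 := by
        rw [PySem.Int.le_floordiv_iff_mul_le (by omega)]; omega
      have hqlt : (PySem.Int.floordiv idx 79).toNat < n := by
        rw [PySem.Int.floordiv_eq_ediv_of_pos (show (0:Int) < 79 by omega)]; omega
      rw [pvLen_rec idx hbig, hA, List.reverse_append]
      rw [ih _ hqlt _ rfl hq1]
      set q := PySem.Int.floordiv idx 79 with hq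
      set L' := pvLenLoop q 1 79 with hL'
      have hL'1 : 1 ≤ L' := hL' ▸ pvLenLoop_ge _ q 79 rfl 1
      have key : ∀ k : Nat,
          PySem.Int.floordiv q (79 ^ k) = PySem.Int.floordiv idx (79 ^ (k + 1)) := by
        intro k
        rw [hq]
        rw [PySem.Int.floordiv_eq_ediv_of_pos (show (0:Int) < 79 ^ k by positivity),
            PySem.Int.floordiv_eq_ediv_of_pos (show (0:Int) < 79 by omega),
            PySem.Int.floordiv_eq_ediv_of_pos (show (0:Int) < 79 ^ (k+1) by positivity)]
        rw [pow_succ']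
        exact Int.ediv_ediv_of_nonneg (by norm_num)
      rw [PySem.List.pyRange_one_succ_right (by omega)]
      rw [List.map_append]
      congr 1
      · -- the first L' digits of idx are the digits of q
        apply List.map_congr_left
        intro i hi
        have hib := (PySem.List.mem_pyRange_one).mp hi
        have hexp : (L' + 1 - 1 - i).toNat = (L' - 1 - i).toNat + 1 := by omega
        rw [hexp, ← key]
      · -- the last digit is idx % 79
        simp only [List.map_cons, List.map_nil, List.reverse_singleton]
        have hz : (L' + 1 - 1 - L').toNat = 0 := by omega
        rw [hz, pow_zero]
        rw [show PySem.Int.floordiv idx 1 = idx by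
          rw [PySem.Int.floordiv_eq_ediv_of_pos (by omega)]; simp]
    · -- base case: 1 ≤ idx < 79
      have hL : pvLenLoop idx 1 79 = 1 := by
        rw [pvLenLoop, if_neg (by omega)]
      rw [hL, hA]
      have hq0 : PySem.Int.floordiv idx 79 = 0 := by
        rw [PySem.Int.floordiv_eq_ediv_of_pos (by norm_num)]; omega
      rw [hq0, pvALoop]
      norm_num
      rw [show PySem.List.pyRange 0 1 1 = [0] from rfl]
      simp

-- ===== VERDICT (by name: the statement is the Claim_ definition above) =====
theorem idx_to_guess_spec : Claim_equal_idx_to_guess := by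
  intro idx _
  unfold Spec_idx_to_guess idx_to_guess idx_to_guess_alt
  by_cases h0 : idx = 0
  · simp [h0]
  · rw [if_neg h0]
    by_cases hneg : idx ≤ 0
    · rw [if_pos hneg, if_neg h0]
      rw [pvALoop, if_neg (by omega)]
      rfl
    · rw [if_neg hneg]
      simp only []
      rw [pvMain _ idx rfl (by omega)]
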